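-- pv_equiv track=rewrite | github.com/aj07mm/project_euler | problem_011.py | diagonal_as_rows
-- ===== SOURCE A (Python) =====
-- def diagonal_as_rows(rows):
--     lines = []
--     diagonals = []
--     aux_inc = 0
--     aux_cols = 0
--     while aux_cols != 20:
--         for row in rows:
--             if aux_inc <= len(row)-1:
--                 lines.append(row[aux_inc])
--             aux_inc += 1
--         diagonals.append(lines)
--         lines = []
--         aux_cols += 1
--         aux_inc = aux_cols
--     return diagonals
-- ===== SOURCE B (Python) =====
-- def diagonal_as_rows(rows):
--     diagonals = [[] for _ in range(20)]
--     for i, row in enumerate(rows):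
--         for c, val in enumerate(row):
--             d = c - i
--             if 0 <= d < 20:
--                 diagonals[d].append(val)
--     return diagonals
-- ===== Notes on version B (the rewrite author's own statement) =====
-- stated objective: alternative
-- what changed: Replaces A's 20 full rescans of the row list (one while-iteration per diagonal, each walking every row with a moving index) by a single pass over all cells that distributes each value into its diagonal bucket d = c - i among 20 preallocated buckets.
import Mathlib
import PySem

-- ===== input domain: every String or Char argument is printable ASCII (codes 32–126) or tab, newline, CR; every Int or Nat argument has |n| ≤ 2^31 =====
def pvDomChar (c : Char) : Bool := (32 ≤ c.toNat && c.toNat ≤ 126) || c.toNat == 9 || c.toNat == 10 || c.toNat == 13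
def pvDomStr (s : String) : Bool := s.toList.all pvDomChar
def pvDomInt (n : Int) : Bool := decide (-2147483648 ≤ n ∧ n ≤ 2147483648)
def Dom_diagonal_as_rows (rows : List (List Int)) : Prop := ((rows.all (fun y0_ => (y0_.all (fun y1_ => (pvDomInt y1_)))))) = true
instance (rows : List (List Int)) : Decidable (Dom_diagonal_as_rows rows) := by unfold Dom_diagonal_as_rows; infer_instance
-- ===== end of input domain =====

-- B distributes every cell once into its diagonal bucket in a single pass, instead of
-- A's 20 rescans of all rows; same return value on every input (objective: alternative).

-- ===== PORT A =====
-- the body of A's 'for row in rows' pass: state = (lines, aux_inc)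
def pvAInner (rows : List (List Int)) (st : List Int × Int) : List Int × Int :=
  rows.foldl
    (fun st row =>
      ((if st.2 ≤ (row.length : Int) - 1 then st.1 ++ [PySem.List.pyGetD row st.2 0] else st.1),
       st.2 + 1))
    st

-- A's 'while aux_cols != 20' loop, as recursion on the remaining iterations (20 - aux_cols)
def pvAWhile (rows : List (List Int)) : Nat → Int → List (List Int) → List (List Int)
  | 0, _, diagonals => diagonals
  | fuel + 1, auxCols, diagonals =>
      let lines := (pvAInner rows ([], auxCols)).1
      pvAWhile rows fuel (auxCols + 1) (diagonals ++ [lines])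

def diagonal_as_rows (rows : List (List Int)) : List (List Int) :=
  pvAWhile rows 20 0 []

-- ===== PORT B =====
-- diagonals[d].append(val)
def pvBPut (bs : List (List Int)) (d : Int) (v : Int) : List (List Int) :=
  bs.modify d.toNat (fun b => b ++ [v])

-- B's inner 'for c, val in enumerate(row)' (counter c carried in the state)
def pvBRow (i : Int) (bs : List (List Int)) (row : List Int) : List (List Int) :=
  (row.foldl
    (fun st v =>
      -- d = c - i, inlined
      ((if 0 ≤ st.2 - i ∧ st.2 - i < 20 then pvBPut st.1 (st.2 - i) v else st.1), st.2 + 1))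
    (bs, (0 : Int))).1

def diagonal_as_rows_alt (rows : List (List Int)) : List (List Int) :=
  (rows.foldl
    (fun st row => (pvBRow st.2 st.1 row, st.2 + 1))
    (List.replicate 20 ([] : List Int), (0 : Int))).1

-- ===== PRECONDITION & SPEC =====
def Spec_diagonal_as_rows (rows : List (List Int)) (out : List (List Int)) : Prop := out = diagonal_as_rows_alt rows
instance (rows : List (List Int)) (out : List (List Int)) : Decidable (Spec_diagonal_as_rows rows out) := by unfold Spec_diagonal_as_rows; infer_instance

-- ===== CLAIM (what is proved, stated in full; the proofs are below) =====
def Claim_equal_diagonal_as_rows : Prop := ∀ (rows : List (List Int)), Dom_diagonal_as_rows rows → Spec_diagonal_as_rows rows (diagonal_as_rows rows)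

-- ===== LEMMAS AND PROOFS =====

-- common characterisation: the diagonal starting at column d of the first row
def pvDiag (d : Int) : List (List Int) → List Int
  | [] => []
  | r :: rs =>
      (if d ≤ (r.length : Int) - 1 ∧ 0 ≤ d then [PySem.List.pyGetD r d 0] else []) ++ pvDiag (d + 1) rs

-- the element of r at offset d (if 0 ≤ d < length), as a 0/1-element list
def pvPick : List Int → Int → List Int
  | [], _ => []
  | v :: vs, d => if d = 0 then [v] else pvPick vs (d - 1)

theorem pvPick_cons_zero (v : Int) (vs : List Int) : pvPick (v :: vs) 0 = [v] := by
  simp [pvPick]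

theorem pvPick_cons_ne (v : Int) (vs : List Int) (d : Int) (h : d ≠ 0) :
    pvPick (v :: vs) d = pvPick vs (d - 1) := by
  simp [pvPick, h]

theorem pvPick_neg (r : List Int) (d : Int) (hd : d < 0) : pvPick r d = [] := by
  induction r generalizing d with
  | nil => rfl
  | cons v vs ih =>
      rw [pvPick_cons_ne v vs d (by omega)]
      exact ih _ (by omega)

theorem pvAInner_eq (rows : List (List Int)) (l : List Int) (a : Int) (ha : 0 ≤ a) :
    pvAInner rows (l, a) = (l ++ pvDiag a rows, a + rows.length) := by
  induction rows generalizing l a with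
  | nil => simp [pvAInner, pvDiag]
  | cons r rs ih =>
      have hstep : pvAInner (r :: rs) (l, a)
          = pvAInner rs ((if a ≤ (r.length : Int) - 1 then l ++ [PySem.List.pyGetD r a 0] else l),
              a + 1) := by
        simp only [pvAInner, List.foldl_cons]
      rw [hstep]
      by_cases h : a ≤ (r.length : Int) - 1
      · rw [if_pos h, ih _ _ (by omega)]
        have hD : pvDiag a (r :: rs) = [PySem.List.pyGetD r a 0] ++ pvDiag (a + 1) rs := by
          simp only [pvDiag, if_pos (And.intro h ha)]
        rw [hD]
        simp only [Prod.mk.injEq]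
        exact ⟨by simp, by simp only [List.length_cons]; push_cast; ring⟩
      · rw [if_neg h, ih _ _ (by omega)]
        have hD : pvDiag a (r :: rs) = pvDiag (a + 1) rs := by
          simp only [pvDiag, if_neg (fun hc : _ ∧ _ => h hc.1), List.nil_append]
        rw [hD]
        simp only [Prod.mk.injEq]
        exact ⟨by simp, by simp only [List.length_cons]; push_cast; ring⟩

theorem pvAWhile_eq (rows : List (List Int)) (fuel : Nat) (c : Int) (ds : List (List Int))
    (hc : 0 ≤ c) :
    pvAWhile rows fuel c ds
      = ds ++ (List.range fuel).map (fun k : Nat => pvDiag (c + (k : Int)) rows) := by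
  induction fuel generalizing c ds with
  | zero => simp [pvAWhile]
  | succ n ih =>
      have hl : (pvAInner rows ([], c)).1 = pvDiag c rows := by
        rw [pvAInner_eq rows [] c hc]
        simp
      simp only [pvAWhile, hl]
      rw [ih (c + 1) _ (by omega)]
      rw [List.range_succ_eq_map, List.map_cons, List.map_map, List.append_assoc,
        List.singleton_append]
      congr 1
      congr 1
      · norm_num
      · apply List.map_congr_left
        intro k _
        simp only [Function.comp_apply]
        congr 1
        push_cast
        ring

theorem pvBPut_length (bs : List (List Int)) (d : Int) (v : Int) :
    (pvBPut bs d v).length = bs.length := by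
  simp [pvBPut]

theorem pvBRow_length (i : Int) (bs : List (List Int)) (row : List Int) :
    (pvBRow i bs row).length = bs.length := by
  unfold pvBRow
  suffices h : ∀ (c : Int) (bs : List (List Int)),
      ((row.foldl (fun st v =>
        ((if 0 ≤ st.2 - i ∧ st.2 - i < 20 then pvBPut st.1 (st.2 - i) v else st.1), st.2 + 1))
        (bs, c)).1).length = bs.length by
    exact h 0 bs
  induction row with
  | nil => intro c bs; simp
  | cons v vs ih =>
      intro c bs
      simp only [List.foldl_cons]
      rw [ih]
      split_ifs with h
      · exact pvBPut_length _ _ _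
      · rfl

theorem pvBRow_getD (row : List Int) (i c : Int) (bs : List (List Int))
    (hlen : bs.length = 20) (j : Nat) (hj : j < 20) :
    ((row.foldl (fun st v =>
        ((if 0 ≤ st.2 - i ∧ st.2 - i < 20 then pvBPut st.1 (st.2 - i) v else st.1), st.2 + 1))
        (bs, c)).1).getD j [] = bs.getD j [] ++ pvPick row ((j : Int) + i - c) := by
  induction row generalizing c bs with
  | nil => simp [pvPick]
  | cons v vs ih =>
      simp only [List.foldl_cons]
      by_cases hm : c - i = (j : Int)
      · -- this cell lands in bucket j; no later cell of the row can hit bucket j again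
        have hg : 0 ≤ c - i ∧ c - i < 20 := by omega
        rw [if_pos hg, ih _ _ (by rw [pvBPut_length]; exact hlen)]
        rw [show (j : Int) + i - (c + 1) = -1 from by omega, pvPick_neg _ _ (by omega),
          List.append_nil]
        rw [show (j : Int) + i - c = 0 from by omega, pvPick_cons_zero]
        unfold pvBPut
        have htn : (c - i).toNat = j := by omega
        rw [htn]
        have hjlen : j < bs.length := by omega
        rw [List.getD_eq_getElem _ _ (by rw [List.length_modify]; omega)]
        rw [List.getElem_modify, if_pos rfl, List.getD_eq_getElem _ _ hjlen]
      · -- bucket j untouched by this cell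
        have hne : (j : Int) + i - c ≠ 0 := by omega
        rw [pvPick_cons_ne v vs _ hne,
          show (j : Int) + i - c - 1 = (j : Int) + i - (c + 1) from by ring]
        split_ifs with hg
        · rw [ih _ _ (by rw [pvBPut_length]; exact hlen)]
          have hput : (pvBPut bs (c - i) v).getD j [] = bs.getD j [] := by
            unfold pvBPut
            have hne2 : (c - i).toNat ≠ j := by omega
            have hjlen : j < bs.length := by omega
            rw [List.getD_eq_getElem _ _ (by rw [List.length_modify]; omega)]
            rw [List.getElem_modify, if_neg hne2, List.getD_eq_getElem _ _ hjlen]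
          rw [hput]
        · rw [ih _ _ hlen]

-- pvPick at a given offset equals the head contribution of pvDiag
theorem pvPick_eq (r : List Int) (d : Int) :
    pvPick r d = (if d ≤ (r.length : Int) - 1 ∧ 0 ≤ d then [PySem.List.pyGetD r d 0] else []) := by
  induction r generalizing d with
  | nil =>
      have h : ¬ (d ≤ (([] : List Int).length : Int) - 1 ∧ 0 ≤ d) := by
        rintro ⟨h1, h2⟩
        simp only [List.length_nil, Nat.cast_zero] at h1
        omega
      rw [if_neg h]
      rfl
  | cons v vs ih =>
      have hL : (((v :: vs).length : Int)) = (vs.length : Int) + 1 := by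
        rw [List.length_cons]; push_cast; ring
      by_cases h0 : d = 0
      · subst h0
        rw [pvPick_cons_zero, if_pos (And.intro (by rw [hL]; omega) le_rfl),
          PySem.List.pyGetD_zero_cons]
      · rw [pvPick_cons_ne v vs d h0, ih]
        by_cases hd : 0 ≤ d
        · have hd1 : (1 : Int) ≤ d := by omega
          by_cases hle : d ≤ ((v :: vs).length : Int) - 1
          · rw [if_pos (And.intro (by rw [hL] at hle; omega) (by omega)),
              if_pos (And.intro hle hd)]
            congr 1
            lift d to ℕ using hd with n
            obtain ⟨m, rfl⟩ : ∃ m : Nat, n = m + 1 := ⟨n - 1, by omega⟩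
            have hc : ((m + 1 : Nat) : Int) - 1 = (m : Int) := by push_cast; ring
            rw [hc, PySem.List.pyGetD_natCast, PySem.List.pyGetD_natCast]
            simp
          · rw [if_neg (by rw [hL] at hle; omega), if_neg (fun hh => hle hh.1)]
        · rw [if_neg (by omega), if_neg (by omega)]

theorem pvBOuter_length (rows : List (List Int)) (i : Int) (bs : List (List Int)) :
    ((rows.foldl (fun st row => (pvBRow st.2 st.1 row, st.2 + 1)) (bs, i)).1).length
      = bs.length := by
  induction rows generalizing i bs with
  | nil => rfl
  | cons r rs ih =>
      simp only [List.foldl_cons]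
      rw [ih]
      exact pvBRow_length _ _ _

theorem pvBOuter_getD (rows : List (List Int)) (i : Int) (bs : List (List Int))
    (hlen : bs.length = 20) (hi : 0 ≤ i) (j : Nat) (hj : j < 20) :
    ((rows.foldl (fun st row => (pvBRow st.2 st.1 row, st.2 + 1)) (bs, i)).1).getD j []
      = bs.getD j [] ++ pvDiag ((j : Int) + i) rows := by
  induction rows generalizing i bs with
  | nil => simp [pvDiag]
  | cons r rs ih =>
      simp only [List.foldl_cons]
      rw [ih (i + 1) (pvBRow i bs r) (by rw [pvBRow_length]; exact hlen) (by omega)]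
      have hrow : (pvBRow i bs r).getD j [] = bs.getD j [] ++ pvPick r ((j : Int) + i) := by
        unfold pvBRow
        rw [pvBRow_getD r i 0 bs hlen j hj]
        norm_num
      rw [hrow, pvPick_eq, List.append_assoc,
        show (j : Int) + (i + 1) = ((j : Int) + i) + 1 from by ring]
      congr 1

-- ===== VERDICT (by name: the statement is the Claim_ definition above) =====
theorem diagonal_as_rows_spec : Claim_equal_diagonal_as_rows := by
  intro rows _
  unfold Spec_diagonal_as_rows
  unfold diagonal_as_rows diagonal_as_rows_alt
  rw [pvAWhile_eq rows 20 0 [] le_rfl, List.nil_append]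
  have hz : (fun k : Nat => pvDiag ((0 : Int) + (k : Int)) rows)
      = (fun k : Nat => pvDiag ((k : Int)) rows) := by
    funext k; norm_num
  rw [hz]
  apply List.ext_getElem
  · rw [pvBOuter_length]; simp
  · intro k h1 h2
    have hk : k < 20 := by simpa using h1
    rw [List.getElem_map, List.getElem_range]
    rw [← List.getD_eq_getElem _ [] h2]
    rw [pvBOuter_getD rows 0 (List.replicate 20 []) (by simp) le_rfl k hk]
    have hrep : (List.replicate 20 ([] : List Int)).getD k [] = [] := by
      rw [List.getD_eq_getElem _ _ (by simpa using hk), List.getElem_replicate]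
    rw [hrep, List.nil_append]
    norm_num
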